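-- pv_equiv track=rewrite | github.com/AbenezerTZ/A2SV | 1758-minimum-changes-to-make-alternating-binary-string/1758-minimum-changes-to-make-alternating-binary-string.py | minOperations
-- ===== SOURCE A (Python) =====
-- def minOperations(s):
--     """
--     :type s: str
--     :rtype: int
--     """
--     even_zero = 0
--     odd_zero = 0
--     even_one = 0
--     odd_one = 0
--     s = list(s)
--     for i in range(len(s)):
--         if s[i]=="0" and (i+1)%2==0:
--             even_zero += 1
--         elif s[i]=="0" and (i+1)%2==1:
--             odd_zero += 1
--         elif s[i]=="1" and (i+1)%2==0:
--             even_one += 1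
--         elif s[i]=="1" and (i+1)%2==1:
--             odd_one += 1
--     return (min(even_zero,odd_zero) + min(even_one,odd_one))
-- ===== SOURCE B (Python) =====
-- def minOperations(s):
--     s = list(s)
--     odd = s[::2]     # 1-indexed odd positions
--     even = s[1::2]   # 1-indexed even positions
--     return min(even.count("0"), odd.count("0")) + min(even.count("1"), odd.count("1"))
-- ===== Notes on version B (the rewrite author's own statement) =====
-- stated objective: simpler
-- what changed: Replaces the four-counter branch-per-character indexed loop with two parity slices (s[::2], s[1::2]) and four count scans combined by the same min formula.
import Mathlib
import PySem

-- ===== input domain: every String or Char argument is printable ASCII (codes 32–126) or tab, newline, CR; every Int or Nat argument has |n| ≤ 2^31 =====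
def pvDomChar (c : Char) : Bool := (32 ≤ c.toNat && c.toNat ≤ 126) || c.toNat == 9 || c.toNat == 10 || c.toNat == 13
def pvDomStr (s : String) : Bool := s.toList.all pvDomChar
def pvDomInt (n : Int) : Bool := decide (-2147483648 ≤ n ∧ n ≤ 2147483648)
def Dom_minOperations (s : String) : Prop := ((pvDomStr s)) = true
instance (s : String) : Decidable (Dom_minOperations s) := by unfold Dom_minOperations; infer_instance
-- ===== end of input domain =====

-- B replaces the four-counter branch-per-character loop with two parity slices and count scans (objective: simpler).

-- ===== PORT A =====
-- the for-loop over range(len(s)) with four counters, as a recursion over the chars carrying the index i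
def minOperationsLoop : List Char → Int → (Int × Int × Int × Int) → (Int × Int × Int × Int)
  | [], _, st => st
  | c :: rest, i, (ez, oz, eo, oo) =>
      minOperationsLoop rest (i + 1)
        (if c == '0' && PySem.Int.mod (i + 1) 2 == 0 then (ez + 1, oz, eo, oo)
         else if c == '0' && PySem.Int.mod (i + 1) 2 == 1 then (ez, oz + 1, eo, oo)
         else if c == '1' && PySem.Int.mod (i + 1) 2 == 0 then (ez, oz, eo + 1, oo)
         else if c == '1' && PySem.Int.mod (i + 1) 2 == 1 then (ez, oz, eo, oo + 1)
         else (ez, oz, eo, oo))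

def minOperations (s : String) : Int :=
  let r := minOperationsLoop s.toList 0 (0, 0, 0, 0)
  min r.1 r.2.1 + min r.2.2.1 r.2.2.2

-- ===== PORT B =====
def minOperations_alt (s : String) : Int :=
  let l := s.toList
  let odd := (PySem.List.slice? l none none 2).getD []
  let even := (PySem.List.slice? l (some 1) none 2).getD []
  ((min (even.count '0') (odd.count '0') : Nat) : Int)
    + ((min (even.count '1') (odd.count '1') : Nat) : Int)

-- ===== PRECONDITION & SPEC =====
def Spec_minOperations (s : String) (out : Int) : Prop := out = minOperations_alt s
instance (s : String) (out : Int) : Decidable (Spec_minOperations s out) := by unfold Spec_minOperations; infer_instance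

-- ===== CLAIM (what is proved, stated in full; the proofs are below) =====
def Claim_equal_minOperations : Prop := ∀ (s : String), Dom_minOperations s → Spec_minOperations s (minOperations s)

-- ===== LEMMAS AND PROOFS =====

-- elements at even 0-based indices
def pvEvens {α : Type} : List α → List α
  | [] => []
  | [a] => [a]
  | a :: _ :: l => a :: pvEvens l

theorem pvEvens_cons {α : Type} (a : α) (l : List α) :
    pvEvens (a :: l) = a :: pvEvens l.tail := by
  cases l <;> simp [pvEvens]

theorem pv_filterMap_evens {α : Type} (l : List α) :
    List.filterMap (fun k => l[2 * k]?) (List.range ((l.length + 1) / 2)) = pvEvens l := by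
  induction l using pvEvens.induct with
  | case1 => simp [pvEvens]
  | case2 a => simp [pvEvens]
  | case3 a b l ih =>
    have hlen : ((a :: b :: l).length + 1) / 2 = ((l.length + 1) / 2) + 1 := by
      simp; omega
    have h2 : ∀ k : Nat, 2 * (k + 1) = 2 * k + 1 + 1 := by omega
    rw [hlen, List.range_succ_eq_map]
    simp only [List.filterMap_cons, List.filterMap_map, pvEvens]
    simp only [Function.comp_def, h2, List.getElem?_cons_succ]
    simp [ih, pvEvens]

theorem pv_slice2_evens {α : Type} (l : List α) :
    PySem.List.slice? l none none 2 = some (pvEvens l) := by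
  simp only [PySem.List.slice?, PySem.List.sliceIndices]
  norm_num
  rw [show (if 0 < l.length then (((l.length:Int) + 2 - 1) / 2).toNat else 0)
        = (l.length + 1) / 2 from by split <;> omega]
  simp only [show ∀ k : Nat, ((2:Int) * (k:Int)).toNat = 2 * k from fun k => by omega]
  exact pv_filterMap_evens l

theorem pv_slice2_odds {α : Type} (l : List α) :
    PySem.List.slice? l (some 1) none 2 = some (pvEvens l.tail) := by
  cases l with
  | nil => simp [PySem.List.slice?, PySem.List.sliceIndices, pvEvens]
  | cons a rest =>
    simp only [PySem.List.slice?, PySem.List.sliceIndices]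
    norm_num
    rw [show (if 0 < rest.length then (((rest.length:Int) + 2 - 1) / 2).toNat else 0)
          = (rest.length + 1) / 2 from by split <;> omega]
    simp only [show ∀ k : Nat, ((1:Int) + 2 * (k:Int)).toNat = 2 * k + 1 from fun k => by omega,
      List.getElem?_cons_succ]
    exact pv_filterMap_evens rest

theorem pv_loop_spec (l : List Char) (i ez oz eo oo : Int) :
    minOperationsLoop l i (ez, oz, eo, oo) =
      if PySem.Int.mod i 2 = 0 then
        (ez + ((pvEvens l.tail).count '0' : Int), oz + ((pvEvens l).count '0' : Int),
         eo + ((pvEvens l.tail).count '1' : Int), oo + ((pvEvens l).count '1' : Int))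
      else
        (ez + ((pvEvens l).count '0' : Int), oz + ((pvEvens l.tail).count '0' : Int),
         eo + ((pvEvens l).count '1' : Int), oo + ((pvEvens l.tail).count '1' : Int)) := by
  induction l generalizing i ez oz eo oo with
  | nil => simp [minOperationsLoop, pvEvens]
  | cons c rest ih =>
    have hmod : ∀ j : Int, PySem.Int.mod j 2 = j % 2 := by
      intro j; simp [PySem.Int.mod, Int.fmod_eq_emod]
    have hm : PySem.Int.mod i 2 = 0 ∨ PySem.Int.mod i 2 = 1 := by
      rw [hmod]; omega
    have hsucc : PySem.Int.mod (i + 1) 2 = (if PySem.Int.mod i 2 = 0 then 1 else 0) := by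
      rw [hmod, hmod]; split <;> omega
    simp only [minOperationsLoop, hsucc]
    rcases hm with h | h <;>
      simp only [h] <;> norm_num <;>
      by_cases h0 : c = '0' <;> by_cases h1 : c = '1' <;>
        simp_all [ih, pvEvens_cons] <;>
        split_ifs <;> simp_all <;> omega

-- ===== VERDICT (by name: the statement is the Claim_ definition above) =====
theorem minOperations_spec : Claim_equal_minOperations := by
  intro s _
  unfold Spec_minOperations minOperations minOperations_alt
  simp only [pv_slice2_evens, pv_slice2_odds, pv_loop_spec, Option.getD_some]
  simp [PySem.Int.mod, Nat.cast_min]
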